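-- pv_equiv track=rewrite | github.com/bipowerhcmcity/Music-Sheet-Pitch-Translation | ReduceSharp.py | getAllNoteHasSharp
-- ===== SOURCE A (Python) =====
-- def getAllNoteHasSharp(staffs, nonSharpIndex):
--     arrayNote = []
--     count =0
--     for notes in staffs:
--
--         for i in nonSharpIndex[count]:
--             if(notes[i][3] == True):
--                 arrayNote.append(str(notes[i][2])[0])
--                 for j in range(len(arrayNote)-1):
--                     if(arrayNote[-1] == arrayNote[j]):
--                         arrayNote.pop(-1)
--                         break
--         count+=1
--
--
--
--     return arrayNote
-- ===== SOURCE B (Python) =====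
-- def getAllNoteHasSharp(staffs, nonSharpIndex):
--     letters = []
--     for count, notes in enumerate(staffs):
--         for i in nonSharpIndex[count]:
--             if notes[i][3] == True:
--                 letters.append(str(notes[i][2])[0])
--     return list(dict.fromkeys(letters))
-- ===== Notes on version B (the rewrite author's own statement) =====
-- stated objective: idiomatic
-- what changed: B collects all first letters of sharp notes into a flat list in one pass and then deduplicates once with dict.fromkeys (first-occurrence order), instead of A's inline scan-and-pop over the growing accumulator after every append.
import Mathlib
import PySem

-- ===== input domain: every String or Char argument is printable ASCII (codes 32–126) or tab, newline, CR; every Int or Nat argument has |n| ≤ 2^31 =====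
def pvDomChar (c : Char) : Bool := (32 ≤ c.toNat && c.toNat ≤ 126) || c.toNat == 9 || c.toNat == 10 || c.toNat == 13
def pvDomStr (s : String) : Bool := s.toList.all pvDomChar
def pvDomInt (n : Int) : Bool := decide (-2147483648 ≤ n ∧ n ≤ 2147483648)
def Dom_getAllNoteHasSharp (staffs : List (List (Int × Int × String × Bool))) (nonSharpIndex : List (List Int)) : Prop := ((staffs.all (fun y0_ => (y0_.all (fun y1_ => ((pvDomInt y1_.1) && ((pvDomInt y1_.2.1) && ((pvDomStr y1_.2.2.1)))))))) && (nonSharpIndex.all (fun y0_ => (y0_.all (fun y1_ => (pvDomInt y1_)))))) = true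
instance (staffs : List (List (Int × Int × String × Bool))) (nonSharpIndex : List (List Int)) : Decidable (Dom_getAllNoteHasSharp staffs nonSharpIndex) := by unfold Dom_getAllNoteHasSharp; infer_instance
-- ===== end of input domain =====

-- B separates collection from deduplication: one flat pass collecting first letters of sharp
-- notes, then a single dict.fromkeys-style dedup, instead of A's inline scan-and-pop (idiomatic).

-- ===== PORT A =====
-- the inner 'for j in range(len(arrayNote)-1): if arrayNote[-1] == arrayNote[j]: pop; break'
-- scans the elements before the appended one for the appended letter x
def pvScanPop : List String → String → Bool
  | [], _ => false
  | y :: ys, x => if x = y then true else pvScanPop ys x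

def getAllNoteHasSharp (staffs : List (List (Int × Int × String × Bool))) (nonSharpIndex : List (List Int)) : List String :=
  (staffs.foldl (fun (st : List String × Int) notes =>
    let idxs := (PySem.List.pyGet? nonSharpIndex st.2).getD []   -- nonSharpIndex[count]; default unreachable under Pre_
    let arr := idxs.foldl (fun arr i =>
      match PySem.List.pyGet? notes i with                        -- notes[i]; default unreachable under Pre_
      | none => arr
      | some n =>
        if n.2.2.2 = true then
          match PySem.Str.pyGet? n.2.2.1 0 with                   -- str(notes[i][2])[0]; none unreachable under Pre_
          | none => arr
          | some c =>
            let arr2 := arr ++ [String.ofList [c]]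
            if pvScanPop arr (String.ofList [c]) then arr2.dropLast else arr2
        else arr) st.1
    (arr, st.2 + 1)) ([], 0)).1

-- ===== PORT B =====
def getAllNoteHasSharp_alt (staffs : List (List (Int × Int × String × Bool))) (nonSharpIndex : List (List Int)) : List String :=
  let letters := (PySem.List.enumerate staffs).foldl (fun (acc : List String) p =>
    ((PySem.List.pyGet? nonSharpIndex p.1).getD []).foldl (fun acc i =>
      match PySem.List.pyGet? p.2 i with
      | none => acc
      | some n =>
        if n.2.2.2 = true then
          match PySem.Str.pyGet? n.2.2.1 0 with
          | none => acc
          | some c => acc ++ [String.ofList [c]]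
        else acc) acc) []
  PySem.List.dedup letters

-- ===== PRECONDITION & SPEC =====
-- Pre_ excludes exactly the inputs where Python A raises: an IndexError from nonSharpIndex[count]
-- (fewer index lists than staffs), from notes[i] (index out of range), or from str(notes[i][2])[0]
-- (a sharp note reached whose pitch string is empty).
def Pre_getAllNoteHasSharp (staffs : List (List (Int × Int × String × Bool))) (nonSharpIndex : List (List Int)) : Prop :=
  staffs.length ≤ nonSharpIndex.length ∧
  ∀ p ∈ staffs.zip nonSharpIndex, ∀ i ∈ p.2,
    PySem.Raise.InRange p.1.length i ∧
    ∀ n ∈ PySem.List.pyGet? p.1 i, n.2.2.2 = true → n.2.2.1 ≠ ""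
instance (staffs : List (List (Int × Int × String × Bool))) (nonSharpIndex : List (List Int)) : Decidable (Pre_getAllNoteHasSharp staffs nonSharpIndex) := by unfold Pre_getAllNoteHasSharp; infer_instance
def pvWitness_getAllNoteHasSharp : (List (List (Int × Int × String × Bool))) × List (List Int) :=
  ([[(1, 2, "C#", true), (3, 4, "D", false)], [(5, 6, "C#", true)]], [[0, 1], [0], [7]])
def Spec_getAllNoteHasSharp (staffs : List (List (Int × Int × String × Bool))) (nonSharpIndex : List (List Int)) (out : List String) : Prop := out = getAllNoteHasSharp_alt staffs nonSharpIndex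
instance (staffs : List (List (Int × Int × String × Bool))) (nonSharpIndex : List (List Int)) (out : List String) : Decidable (Spec_getAllNoteHasSharp staffs nonSharpIndex out) := by unfold Spec_getAllNoteHasSharp; infer_instance

-- ===== CLAIM (what is proved, stated in full; the proofs are below) =====
def Claim_equal_getAllNoteHasSharp : Prop := ∀ (staffs : List (List (Int × Int × String × Bool))) (nonSharpIndex : List (List Int)), Dom_getAllNoteHasSharp staffs nonSharpIndex → Pre_getAllNoteHasSharp staffs nonSharpIndex → Spec_getAllNoteHasSharp staffs nonSharpIndex (getAllNoteHasSharp staffs nonSharpIndex)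

-- ===== LEMMAS AND PROOFS =====

theorem pvScanPop_eq_contains (arr : List String) (x : String) :
    pvScanPop arr x = arr.contains x := by
  induction arr with
  | nil => rfl
  | cons y ys ih =>
    simp [pvScanPop, ih]

-- A's per-letter step is Set.add
theorem pvStep_eq_add (arr : List String) (x : String) :
    (if pvScanPop arr x then (arr ++ [x]).dropLast else arr ++ [x]) = PySem.Set.add arr x := by
  rw [pvScanPop_eq_contains, List.dropLast_concat]
  simp [PySem.Set.add, PySem.Set.contains]

theorem ofList_snoc (acc : List String) (x : String) :
    PySem.Set.ofList (acc ++ [x]) = PySem.Set.add (PySem.Set.ofList acc) x := by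
  simp [PySem.Set.ofList_eq_foldl, List.foldl_append]

-- inner loop: A's accumulator stays the ordered dedup of B's flat letter list
theorem inner_eq (idxs : List Int) (notes : List (Int × Int × String × Bool)) (acc : List String) :
    idxs.foldl (fun arr i =>
      match PySem.List.pyGet? notes i with
      | none => arr
      | some n =>
        if n.2.2.2 = true then
          match PySem.Str.pyGet? n.2.2.1 0 with
          | none => arr
          | some c =>
            let arr2 := arr ++ [String.ofList [c]]
            if pvScanPop arr (String.ofList [c]) then arr2.dropLast else arr2
        else arr) (PySem.Set.ofList acc)
    = PySem.Set.ofList (idxs.foldl (fun acc i =>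
      match PySem.List.pyGet? notes i with
      | none => acc
      | some n =>
        if n.2.2.2 = true then
          match PySem.Str.pyGet? n.2.2.1 0 with
          | none => acc
          | some c => acc ++ [String.ofList [c]]
        else acc) acc) := by
  induction idxs generalizing acc with
  | nil => rfl
  | cons i rest ih =>
    simp only [List.foldl_cons]
    cases h : PySem.List.pyGet? notes i with
    | none => exact ih acc
    | some n =>
      by_cases hb : n.2.2.2 = true
      · cases hc : PySem.Str.pyGet? n.2.2.1 0 with
        | none => simp only [hb, hc, if_true]; exact ih acc
        | some c =>
          simp only [hb, hc, if_true]
          rw [pvStep_eq_add, ← ofList_snoc]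
          exact ih _
      · simp only [if_neg hb]
        exact ih acc

theorem outer_eq (staffs : List (List (Int × Int × String × Bool))) (nonSharpIndex : List (List Int))
    (k : Int) (acc : List String) :
    (staffs.foldl (fun (st : List String × Int) notes =>
      let idxs := (PySem.List.pyGet? nonSharpIndex st.2).getD []
      let arr := idxs.foldl (fun arr i =>
        match PySem.List.pyGet? notes i with
        | none => arr
        | some n =>
          if n.2.2.2 = true then
            match PySem.Str.pyGet? n.2.2.1 0 with
            | none => arr
            | some c =>
              let arr2 := arr ++ [String.ofList [c]]
              if pvScanPop arr (String.ofList [c]) then arr2.dropLast else arr2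
          else arr) st.1
      (arr, st.2 + 1)) (PySem.Set.ofList acc, k)).1
    = PySem.Set.ofList ((PySem.List.enumerate staffs k).foldl (fun (acc : List String) p =>
      ((PySem.List.pyGet? nonSharpIndex p.1).getD []).foldl (fun acc i =>
        match PySem.List.pyGet? p.2 i with
        | none => acc
        | some n =>
          if n.2.2.2 = true then
            match PySem.Str.pyGet? n.2.2.1 0 with
            | none => acc
            | some c => acc ++ [String.ofList [c]]
          else acc) acc) acc) := by
  induction staffs generalizing k acc with
  | nil => rfl
  | cons notes rest ih =>
    simp only [List.foldl_cons, PySem.List.enumerate_cons]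
    rw [show ∀ l : List Int, l.foldl (fun arr i =>
        match PySem.List.pyGet? notes i with
        | none => arr
        | some n =>
          if n.2.2.2 = true then
            match PySem.Str.pyGet? n.2.2.1 0 with
            | none => arr
            | some c =>
              let arr2 := arr ++ [String.ofList [c]]
              if pvScanPop arr (String.ofList [c]) then arr2.dropLast else arr2
          else arr) (PySem.Set.ofList acc)
      = PySem.Set.ofList (l.foldl (fun acc i =>
        match PySem.List.pyGet? notes i with
        | none => acc
        | some n =>
          if n.2.2.2 = true then
            match PySem.Str.pyGet? n.2.2.1 0 with
            | none => acc
            | some c => acc ++ [String.ofList [c]]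
          else acc) acc) from fun l => inner_eq l notes acc]
    exact ih (k + 1) _

-- ===== VERDICT (by name: the statement is the Claim_ definition above) =====
theorem getAllNoteHasSharp_spec : Claim_equal_getAllNoteHasSharp := by
  intro staffs nonSharpIndex _ _
  unfold Spec_getAllNoteHasSharp getAllNoteHasSharp getAllNoteHasSharp_alt
  simpa [PySem.List.dedup_eq_ofList] using outer_eq staffs nonSharpIndex 0 []
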